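-- pv_equiv track=rewrite | github.com/Erlonidas/scraping-log-kafka-infra | controllers/.ipynb_checkpoints/kafka_Infra-checkpoint.py | segregation_log
-- ===== SOURCE A (Python) =====
-- def segregation_log(content_log: list) -> list:
--     endGame_sight = '-----'
--     endGame = False
--     start_position = 0
--     splitted_game = []
--
--     for slot, line in enumerate(content_log):
--         if (endGame_sight in line) and (endGame == False):
--             splitted_game.append(content_log[start_position:slot])
--             start_position = slot + 1
--             endGame = True
--         elif (endGame_sight in line) and (endGame == True):
--             endGame = False
--             continue
--     return splitted_game
-- ===== SOURCE B (Python) =====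
-- def segregation_log(content_log: list) -> list:
--     marks = [i for i, line in enumerate(content_log) if '-----' in line]
--     out = []
--     start = 0
--     for d in marks[::2]:
--         out.append(content_log[start:d])
--         start = d + 1
--     return out
-- ===== Notes on version B (the rewrite author's own statement) =====
-- stated objective: alternative
-- what changed: Replaces the toggle-flag state machine over enumerated lines by a two-phase decomposition: collect all delimiter indices first, then slice at every other mark.
import Mathlib
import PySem

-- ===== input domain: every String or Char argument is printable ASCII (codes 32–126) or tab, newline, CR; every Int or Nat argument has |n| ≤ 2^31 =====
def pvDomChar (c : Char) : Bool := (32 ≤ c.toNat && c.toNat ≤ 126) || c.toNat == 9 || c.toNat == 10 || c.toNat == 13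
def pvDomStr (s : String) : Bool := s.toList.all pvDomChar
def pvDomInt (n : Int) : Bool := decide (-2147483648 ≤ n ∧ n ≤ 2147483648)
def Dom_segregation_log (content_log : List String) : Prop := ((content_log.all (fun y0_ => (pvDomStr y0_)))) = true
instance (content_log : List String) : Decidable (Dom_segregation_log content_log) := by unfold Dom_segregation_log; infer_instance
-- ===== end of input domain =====

-- B replaces A's toggle-flag state machine by: collect delimiter indices, then slice at every other mark (alternative decomposition, same cost).

-- ===== PORT A =====
-- A's for-loop over enumerate(content_log) with state (endGame, start_position, splitted_game)
def segLoopA (content_log : List String) :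
    List (Int × String) → Bool → Int → List (List String) → List (List String)
  | [], _, _, acc => acc
  | (slot, line) :: rest, endGame, start, acc =>
    if PySem.Str.isIn "-----" line && !endGame then
      segLoopA content_log rest true (slot + 1)
        (acc ++ [PySem.List.slice content_log (some start) (some slot)])
    else if PySem.Str.isIn "-----" line && endGame then
      segLoopA content_log rest false start acc
    else
      segLoopA content_log rest endGame start acc

def segregation_log (content_log : List String) : List (List String) :=
  segLoopA content_log (PySem.List.enumerate content_log) false 0 []

-- ===== PORT B =====
-- marks = [i for i, line in enumerate(content_log) if '-----' in line]
def segMarks (content_log : List String) : List Int :=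
  (PySem.List.enumerate content_log).filterMap
    (fun p => if PySem.Str.isIn "-----" p.2 then some p.1 else none)

-- hand port of the step-2 slice marks[::2] (exact: Python's [::2] keeps elements 0,2,4,…)
def everyOther : List Int → List Int
  | [] => []
  | [d] => [d]
  | d :: _ :: rest => d :: everyOther rest

-- the for-loop over marks[::2] with state (start, out)
def segLoopB (content_log : List String) : List Int → Int → List (List String) → List (List String)
  | [], _, acc => acc
  | d :: ds, start, acc =>
    segLoopB content_log ds (d + 1)
      (acc ++ [PySem.List.slice content_log (some start) (some d)])

def segregation_log_alt (content_log : List String) : List (List String) :=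
  segLoopB content_log (everyOther (segMarks content_log)) 0 []

-- ===== PRECONDITION & SPEC =====
def Spec_segregation_log (content_log : List String) (out : List (List String)) : Prop := out = segregation_log_alt content_log
instance (content_log : List String) (out : List (List String)) : Decidable (Spec_segregation_log content_log out) := by unfold Spec_segregation_log; infer_instance

-- ===== CLAIM (what is proved, stated in full; the proofs are below) =====
def Claim_equal_segregation_log : Prop := ∀ (content_log : List String), Dom_segregation_log content_log → Spec_segregation_log content_log (segregation_log content_log)

-- ===== LEMMAS AND PROOFS =====

def marksOf (ps : List (Int × String)) : List Int :=
  ps.filterMap (fun p => if PySem.Str.isIn "-----" p.2 then some p.1 else none)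

theorem everyOther_cons (d : Int) (m : List Int) :
    everyOther (d :: m) = d :: everyOther (m.drop 1) := by
  cases m <;> simp [everyOther]

theorem segLoop_agree (cl : List String) (ps : List (Int × String)) :
    ∀ (s : Int) (acc : List (List String)),
      (segLoopA cl ps false s acc = segLoopB cl (everyOther (marksOf ps)) s acc) ∧
      (segLoopA cl ps true s acc = segLoopB cl (everyOther ((marksOf ps).drop 1)) s acc) := by
  induction ps with
  | nil => intro s acc; simp [segLoopA, segLoopB, marksOf, everyOther]
  | cons p rest ih =>
    obtain ⟨slot, line⟩ := p
    intro s acc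
    by_cases h : PySem.Str.isIn "-----" line = true
    · constructor
      · rw [show segLoopA cl ((slot, line) :: rest) false s acc =
            segLoopA cl rest true (slot + 1)
              (acc ++ [PySem.List.slice cl (some s) (some slot)]) by
              simp [segLoopA, h, -PySem.Str.isIn_eq]]
        rw [(ih _ _).2]
        rw [show marksOf ((slot, line) :: rest) = slot :: marksOf rest by
              simp [marksOf, h, -PySem.Str.isIn_eq]]
        rw [everyOther_cons]
        simp [segLoopB]
      · rw [show segLoopA cl ((slot, line) :: rest) true s acc =
            segLoopA cl rest false s acc by simp [segLoopA, h, -PySem.Str.isIn_eq]]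
        rw [(ih _ _).1]
        rw [show marksOf ((slot, line) :: rest) = slot :: marksOf rest by
              simp [marksOf, h, -PySem.Str.isIn_eq]]
        simp
    · have hm : marksOf ((slot, line) :: rest) = marksOf rest := by
        simp [marksOf, h, -PySem.Str.isIn_eq]
      constructor
      · rw [show segLoopA cl ((slot, line) :: rest) false s acc =
            segLoopA cl rest false s acc by simp [segLoopA, h, -PySem.Str.isIn_eq]]
        rw [(ih _ _).1, hm]
      · rw [show segLoopA cl ((slot, line) :: rest) true s acc =
            segLoopA cl rest true s acc by simp [segLoopA, h, -PySem.Str.isIn_eq]]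
        rw [(ih _ _).2, hm]

-- ===== VERDICT (by name: the statement is the Claim_ definition above) =====
theorem segregation_log_spec : Claim_equal_segregation_log := by
  intro content_log _
  unfold Spec_segregation_log segregation_log segregation_log_alt
  have h := (segLoop_agree content_log (PySem.List.enumerate content_log) 0 []).1
  simpa [segMarks, marksOf] using h
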